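-- pv_equiv track=rewrite | github.com/shmuelamar/hypenymy | inferbert_datasets/knowledge_graph_linker/wordnet_parsing_utils.py | find_all_country_ind
-- ===== SOURCE A (Python) =====
-- def find_all_country_ind(country, tokens):
--     # example: country_orig='united states of america' ; tokens = ['i', 'used', 'to', 'live', 'in', 'the', 'u', '.', 's', '.', 'a', 'when', 'i', 'was', 'young']
--     synonyms = {'united states of america': ['united states of america', 'the united states of america', 'the united states', 'united states', 'us', 'usa', 'america', 'the us', 'the usa', 'u . s .', 'u . s', 'the u . s .', 'the u . s . a .',
--                                               'the u . s . a', 'u . s . a', 'u . s . a .'], 'united kingdom':['kingdom of england', 'england', 'the united kingdom', 'united kingdom', 'uk', 'u . k .', 'the u . k .', 'great britain', 'britain']}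
--     indices = []
--     i = 0
--     while i < len(tokens):
--         t = tokens[i]
--         if country in synonyms:
--             for c_syn in synonyms[country]:
--                 equal = True
--                 for j, ct in enumerate(c_syn.split()):
--                     if i + j >= len(tokens) or tokens[i + j] != ct:
--                         equal = False
--                         break
--                 if equal:
--                     indices.append(i)
--                     i += len(c_syn.split())
--                     break
--         else:
--             if country == t:
--                 indices.append(i)
--         i += 1
--     return indices
-- ===== SOURCE B (Python) =====
-- SYNONYMS = {'united states of america': ['united states of america', 'the united states of america', 'the united states', 'united states', 'us', 'usa', 'america', 'the us', 'the usa', 'u . s .', 'u . s', 'the u . s .', 'the u . s . a .',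
--                                          'the u . s . a', 'u . s . a', 'u . s . a .'],
--             'united kingdom': ['kingdom of england', 'england', 'the united kingdom', 'united kingdom', 'uk', 'u . k .', 'the u . k .', 'great britain', 'britain']}
--
--
-- def find_all_country_ind(country, tokens):
--     syns = SYNONYMS.get(country)
--     if syns is None:
--         return [i for i, t in enumerate(tokens) if t == country]
--     # index: first token of each phrase -> list of the phrases' remaining tokens, in list order
--     by_first = {}
--     for phrase in syns:
--         parts = phrase.split()
--         by_first[parts[0]] = by_first.get(parts[0], []) + [parts[1:]]
--     indices = []
--     i = 0
--     n = len(tokens)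
--     while i < n:
--         for rest in by_first.get(tokens[i], []):
--             if tokens[i + 1:i + 1 + len(rest)] == rest:
--                 indices.append(i)
--                 i += 1 + len(rest)
--                 break
--         i += 1
--     return indices
-- ===== Notes on version B (the rewrite author's own statement) =====
-- stated objective: idiomatic
-- what changed: B precomputes a first-token index of the split synonym phrases once (and handles the no-synonyms case as a plain enumerate comprehension), so each position does one dict lookup and slice comparisons instead of re-splitting and scanning every synonym phrase with an inner flag loop; the i += len(phrase)+1 advance is preserved.
import Mathlib
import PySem

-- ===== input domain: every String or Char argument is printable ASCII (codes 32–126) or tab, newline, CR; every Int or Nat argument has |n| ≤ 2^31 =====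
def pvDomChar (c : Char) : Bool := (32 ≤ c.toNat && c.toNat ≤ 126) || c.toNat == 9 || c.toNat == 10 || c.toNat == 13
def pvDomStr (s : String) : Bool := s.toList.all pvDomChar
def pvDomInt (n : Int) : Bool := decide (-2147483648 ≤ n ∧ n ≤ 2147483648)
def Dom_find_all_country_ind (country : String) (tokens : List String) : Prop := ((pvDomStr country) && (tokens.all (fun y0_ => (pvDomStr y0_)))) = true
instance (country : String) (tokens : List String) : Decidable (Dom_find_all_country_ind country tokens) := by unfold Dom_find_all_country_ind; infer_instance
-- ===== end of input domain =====

set_option maxRecDepth 8000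


-- B replaces A's per-position scan over every synonym phrase by a precomputed
-- first-token index consulted once per position (idiomatic/alternative; same i advance arithmetic).

-- shared constant data: the synonyms dict literal (same literal in both Pythons)
def pvSynonyms : PySem.Dict String (List String) :=
  PySem.Dict.ofList
    [("united states of america",
       ["united states of america", "the united states of america", "the united states",
        "united states", "us", "usa", "america", "the us", "the usa", "u . s .", "u . s",
        "the u . s .", "the u . s . a .", "the u . s . a", "u . s . a", "u . s . a ."]),
     ("united kingdom",
       ["kingdom of england", "england", "the united kingdom", "united kingdom", "uk",
        "u . k .", "the u . k .", "great britain", "britain"])]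

-- ===== PORT A =====
-- inner 'for j, ct in enumerate(c_syn.split())' flag loop: equal ⇔ every ct matches in range
def pvEqAt (tokens : List String) (k : Nat) : List String → Bool
  | [] => true
  | ct :: rest =>
      if k < tokens.length && tokens.getD k "" == ct then pvEqAt tokens (k + 1) rest else false

-- the 'for c_syn in synonyms[country]' loop: first matching phrase, its split length
def pvTrySyns (tokens : List String) (i : Nat) : List String → Option Nat
  | [] => none
  | s :: rest =>
      let parts := PySem.Str.split₀ s
      if pvEqAt tokens i parts then some parts.length else pvTrySyns tokens i rest

def pvLoopA (country : String) (tokens : List String) (i : Nat) (acc : List Int) : List Int :=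
  if i < tokens.length then
    match pvSynonyms.get? country with
    | some syns =>
      match pvTrySyns tokens i syns with
      | some L => pvLoopA country tokens (i + L + 1) (acc ++ [(i : Int)])
      | none => pvLoopA country tokens (i + 1) acc
    | none =>
      if country == tokens.getD i "" then pvLoopA country tokens (i + 1) (acc ++ [(i : Int)])
      else pvLoopA country tokens (i + 1) acc
  else acc
termination_by tokens.length - i

def find_all_country_ind (country : String) (tokens : List String) : List Int :=
  pvLoopA country tokens 0 []

-- ===== PORT B =====
-- by_first[parts[0]] = by_first.get(parts[0], []) + [parts[1:]]  (parts is never empty for the constant phrases,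
-- so headD "" is exact for parts[0])
def pvBuildIdx (syns : List String) : PySem.Dict String (List (List String)) :=
  syns.foldl
    (fun d s =>
      let parts := PySem.Str.split₀ s
      d.modify (parts.headD "") [] (· ++ [parts.tail]))
    PySem.Dict.empty

-- 'for rest in by_first.get(tokens[i], [])': first rest whose slice matches; tokens[i+1:i+1+len(rest)]
-- with nonnegative in-order bounds is exactly drop/take (PySem.List.slice_natCast_add)
def pvTryRests (tokens : List String) (i : Nat) : List (List String) → Option Nat
  | [] => none
  | rest :: more =>
      if (tokens.drop (i + 1)).take rest.length == rest then some rest.length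
      else pvTryRests tokens i more

def pvLoopB (idx : PySem.Dict String (List (List String))) (tokens : List String) (i : Nat)
    (acc : List Int) : List Int :=
  if i < tokens.length then
    match pvTryRests tokens i (idx.getD (tokens.getD i "") []) with
    | some r => pvLoopB idx tokens (i + r + 2) (acc ++ [(i : Int)])
    | none => pvLoopB idx tokens (i + 1) acc
  else acc
termination_by tokens.length - i

def find_all_country_ind_alt (country : String) (tokens : List String) : List Int :=
  match pvSynonyms.get? country with
  | none => ((PySem.List.enumerate tokens).filter (fun p => p.2 == country)).map (fun p => p.1)
  | some syns => pvLoopB (pvBuildIdx syns) tokens 0 []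

-- ===== PRECONDITION & SPEC =====
def Spec_find_all_country_ind (country : String) (tokens : List String) (out : List Int) : Prop := out = find_all_country_ind_alt country tokens
instance (country : String) (tokens : List String) (out : List Int) : Decidable (Spec_find_all_country_ind country tokens out) := by unfold Spec_find_all_country_ind; infer_instance

-- ===== CLAIM (what is proved, stated in full; the proofs are below) =====
def Claim_equal_find_all_country_ind : Prop := ∀ (country : String) (tokens : List String), Dom_find_all_country_ind country tokens → Spec_find_all_country_ind country tokens (find_all_country_ind country tokens)

-- ===== LEMMAS AND PROOFS =====

-- A's inner flag loop checks the same thing as B's slice comparison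
theorem pvEqAt_eq_take (tokens : List String) :
    ∀ (parts : List String) (k : Nat),
      pvEqAt tokens k parts = ((tokens.drop k).take parts.length == parts) := by
  intro parts
  induction parts with
  | nil => intro k; simp [pvEqAt]
  | cons ct rest ih =>
    intro k
    by_cases hk : k < tokens.length
    · have hdrop : tokens.drop k = tokens[k] :: tokens.drop (k + 1) :=
        (List.getElem_cons_drop hk).symm
      simp only [pvEqAt, hdrop, hk, decide_true, Bool.true_and, List.getD_eq_getElem?_getD,
        List.getElem?_eq_getElem hk, Option.getD_some, List.length_cons, List.take_succ_cons]
      by_cases he : tokens[k] == ct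
      · have he' : tokens[k] = ct := eq_of_beq he
        simp [he', ih]
      · simp [he]
    · have hdrop : tokens.drop k = [] := List.drop_eq_nil_of_le (by omega)
      simp [pvEqAt, hk, hdrop]

theorem pvBuildIdx_getD (syns : List String) (t : String) :
    (pvBuildIdx syns).getD t []
      = ((syns.filter (fun s => (PySem.Str.split₀ s).headD "" == t)).map
          (fun s => (PySem.Str.split₀ s).tail)) := by
  have h : pvBuildIdx syns
      = (syns.map (fun s => ((PySem.Str.split₀ s).headD "", (PySem.Str.split₀ s).tail))).foldl
          (fun d p => d.modify p.1 [] (· ++ [p.2])) PySem.Dict.empty := by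
    simp [pvBuildIdx, List.foldl_map]
  rw [h, PySem.Dict.getD_foldl_modify_append]
  simp [List.filter_map, Function.comp_def, List.map_map]

theorem pvTrySyns_eq (tokens : List String) (i : Nat) (hi : i < tokens.length) :
    ∀ syns : List String, (∀ s ∈ syns, PySem.Str.split₀ s ≠ []) →
      pvTrySyns tokens i syns
        = Option.map (· + 1)
            (pvTryRests tokens i
              ((syns.filter (fun s => (PySem.Str.split₀ s).headD "" == tokens.getD i "")).map
                (fun s => (PySem.Str.split₀ s).tail))) := by
  intro syns
  induction syns with
  | nil => intro _; simp [pvTrySyns, pvTryRests]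
  | cons s rest ih =>
    intro hne
    have hs : PySem.Str.split₀ s ≠ [] := hne s (by simp)
    obtain ⟨p0, pt, hparts⟩ : ∃ p0 pt, PySem.Str.split₀ s = p0 :: pt := by
      cases h : PySem.Str.split₀ s with
      | nil => exact absurd h hs
      | cons a b => exact ⟨a, b, rfl⟩
    have hget : tokens.getD i "" = tokens[i] := by
      simp [List.getD_eq_getElem?_getD, List.getElem?_eq_getElem hi]
    have hdrop : tokens.drop i = tokens[i] :: tokens.drop (i + 1) :=
      (List.getElem_cons_drop hi).symm
    have ihr := ih (fun x hx => hne x (by simp [hx]))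
    by_cases hp0 : p0 == tokens[i]
    · -- first token matches: phrase is kept by the filter
      have hp0eq : p0 = tokens[i] := eq_of_beq hp0
      have hpa : ((PySem.Str.split₀ s).headD "" == tokens.getD i "") = true := by
        rw [hparts, List.headD_cons, hget, hp0eq]; exact beq_self_eq_true _
      rw [List.filter_cons_of_pos
        (p := fun s => ((PySem.Str.split₀ s).headD "" == tokens.getD i "")) (l := rest) hpa]
      have heq : pvEqAt tokens i (p0 :: pt)
          = ((tokens.drop (i + 1)).take pt.length == pt) := by
        rw [pvEqAt_eq_take, hdrop]
        have hp0' : tokens[i] = p0 := hp0eq.symm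
        simp [List.take_succ_cons, hp0']
      simp only [pvTrySyns, hparts, heq, List.map_cons, pvTryRests]
      by_cases hm : ((tokens.drop (i + 1)).take pt.length == pt)
      · simp [hm]
      · simp [hm, ihr]
    · -- first token differs: A's flag loop fails immediately, the filter drops the phrase
      have hpa : ((PySem.Str.split₀ s).headD "" == tokens.getD i "") = false := by
        rw [hparts, List.headD_cons, hget]
        exact beq_eq_false_iff_ne.mpr (fun h => hp0 (by simp [h]))
      rw [List.filter_cons_of_neg
        (p := fun s => ((PySem.Str.split₀ s).headD "" == tokens.getD i "")) (l := rest)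
        (by exact ne_true_of_eq_false hpa)]
      have heq : pvEqAt tokens i (p0 :: pt) = false := by
        have hc : (tokens.getD i "" == p0) = false := by
          rw [hget]
          exact beq_eq_false_iff_ne.mpr (fun h => hp0 (by simp [h]))
        rw [show pvEqAt tokens i (p0 :: pt)
            = if (decide (i < tokens.length) && (tokens.getD i "" == p0)) = true then
                pvEqAt tokens (i + 1) pt
              else false from rfl, hc]
        simp
      simp only [pvTrySyns, hparts, heq, Bool.false_eq_true, if_false]
      exact ihr

-- nonempty splits for both constant synonym lists
theorem pvSyn_nonempty (country : String) (syns : List String)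
    (h : pvSynonyms.get? country = some syns) : ∀ s ∈ syns, PySem.Str.split₀ s ≠ [] := by
  by_cases h1 : country = "united states of america"
  · subst h1
    have hsy : syns = pvSynonyms.getD "united states of america" [] := by
      rw [PySem.Dict.getD_eq_get?_getD, h]
      rfl
    subst hsy; decide
  · by_cases h2 : country = "united kingdom"
    · subst h2
      have hsy : syns = pvSynonyms.getD "united kingdom" [] := by
        rw [PySem.Dict.getD_eq_get?_getD, h]
        rfl
      subst hsy; decide
    · exfalso
      have k1 : ("united states of america" == country) = false :=
        beq_eq_false_iff_ne.mpr (fun hh => h1 hh.symm)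
      have k2 : ("united kingdom" == country) = false :=
        beq_eq_false_iff_ne.mpr (fun hh => h2 hh.symm)
      have hmk : pvSynonyms = PySem.Dict.mk
          [("united states of america",
       ["united states of america", "the united states of america", "the united states",
        "united states", "us", "usa", "america", "the us", "the usa", "u . s .", "u . s",
        "the u . s .", "the u . s . a .", "the u . s . a", "u . s . a", "u . s . a ."]),
     ("united kingdom",
       ["kingdom of england", "england", "the united kingdom", "united kingdom", "uk",
        "u . k .", "the u . k .", "great britain", "britain"])] := by rfl
      have hnone : pvSynonyms.get? country = none := by
        rw [hmk, PySem.Dict.get?_mk_cons, k1, PySem.Dict.get?_mk_cons, k2]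
        simp [PySem.Dict.get?]
      rw [hnone] at h
      exact Option.some_ne_none syns h.symm

-- the synonym case: the two loops agree step for step
theorem pvLoop_eq (country : String) (tokens : List String) (syns : List String)
    (hget : pvSynonyms.get? country = some syns)
    (hne : ∀ s ∈ syns, PySem.Str.split₀ s ≠ []) :
    ∀ n i acc, tokens.length - i ≤ n →
      pvLoopA country tokens i acc = pvLoopB (pvBuildIdx syns) tokens i acc := by
  intro n
  induction n with
  | zero =>
    intro i acc hn
    have hi : ¬ i < tokens.length := by omega
    rw [pvLoopA, pvLoopB]; simp [hi]
  | succ m ih =>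
    intro i acc hn
    by_cases hi : i < tokens.length
    · rw [pvLoopA, pvLoopB]
      simp only [hi, if_true, hget]
      rw [pvTrySyns_eq tokens i hi syns hne, pvBuildIdx_getD]
      cases hr : pvTryRests tokens i
          ((syns.filter (fun s => (PySem.Str.split₀ s).headD "" == tokens.getD i "")).map
            (fun s => (PySem.Str.split₀ s).tail)) with
      | none => simp only [Option.map_none]; exact ih (i + 1) acc (by omega)
      | some r =>
        simp only [Option.map_some]
        have : i + (r + 1) + 1 = i + r + 2 := by omega
        rw [this]
        exact ih (i + r + 2) (acc ++ [(i : Int)]) (by omega)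
    · rw [pvLoopA, pvLoopB]; simp [hi]

-- the plain-country case: A's loop is B's enumerate comprehension
theorem pvLoop_none (country : String) (tokens : List String)
    (hget : pvSynonyms.get? country = none) :
    ∀ n i acc, tokens.length - i ≤ n →
      pvLoopA country tokens i acc
        = acc ++ ((PySem.List.enumerate (tokens.drop i) (i : Int)).filter
            (fun p => p.2 == country)).map (fun p => p.1) := by
  intro n
  induction n with
  | zero =>
    intro i acc hn
    have hi : ¬ i < tokens.length := by omega
    have hdrop : tokens.drop i = [] := List.drop_eq_nil_of_le (by omega)
    rw [pvLoopA]; simp [hi, hdrop]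
  | succ m ih =>
    intro i acc hn
    by_cases hi : i < tokens.length
    · have hdrop : tokens.drop i = tokens[i] :: tokens.drop (i + 1) :=
        (List.getElem_cons_drop hi).symm
      have hget' : tokens.getD i "" = tokens[i] := by
        simp [List.getD_eq_getElem?_getD, List.getElem?_eq_getElem hi]
      rw [pvLoopA]
      simp only [hi, if_true, hget, hget']
      rw [hdrop, PySem.List.enumerate_cons]
      by_cases hc : country == tokens[i]
      · have hc' : (tokens[i] == country) = true := by
          rw [eq_of_beq hc]; exact beq_self_eq_true _
        simp only [hc, if_true, List.filter_cons, hc', if_true, List.map_cons]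
        rw [ih (i + 1) (acc ++ [(i : Int)]) (by omega)]
        push_cast
        simp
      · have hc' : (tokens[i] == country) = false :=
          beq_eq_false_iff_ne.mpr (fun h => hc (by simp [h]))
        simp only [hc, if_false, List.filter_cons, hc', Bool.false_eq_true, if_false]
        rw [ih (i + 1) acc (by omega)]
        push_cast
        simp
    · have hdrop : tokens.drop i = [] := List.drop_eq_nil_of_le (by omega)
      rw [pvLoopA]; simp [hi, hdrop]

-- ===== VERDICT (by name: the statement is the Claim_ definition above) =====
theorem find_all_country_ind_spec : Claim_equal_find_all_country_ind := by
  intro country tokens _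
  unfold Spec_find_all_country_ind find_all_country_ind find_all_country_ind_alt
  cases hget : pvSynonyms.get? country with
  | none =>
    rw [pvLoop_none country tokens hget tokens.length 0 [] (by omega)]
    simp
  | some syns =>
    exact pvLoop_eq country tokens syns hget (pvSyn_nonempty country syns hget)
      tokens.length 0 [] (by omega)
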